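-- pv_equiv track=rewrite | github.com/romainvigneres/advent_of_code | year2015/day03/code.py | compute
-- ===== SOURCE A (Python) =====
-- def compute(inp_str):
--     route = list(inp_str)
--     x = 0
--     y = 0
--     houses = {(0, 0): 1}
--     path = {"^": [0, 1], "v": [0, -1], ">": [1, 0], "<": [-1, 0]}
--     for direction in route:
--         a, b = path.get(direction)
--         x += a
--         y += b
--         house = (x, y)
--         if house not in houses:
--             houses[house] = 1
--         else:
--             houses[house] += 1
--     return houses
-- ===== SOURCE B (Python) =====
-- def compute(inp_str):
--     # Two separate passes: first materialise the full list of visited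
--     # coordinates (a running-sum scan seeded at the origin), then tally
--     # frequencies over that list in a second pass.
--     deltas = {"^": (0, 1), "v": (0, -1), ">": (1, 0), "<": (-1, 0)}
--     coords = [(0, 0)]
--     for c in inp_str:
--         dx, dy = deltas.get(c)
--         x, y = coords[-1]
--         coords.append((x + dx, y + dy))
--     houses = {}
--     for house in coords:
--         houses[house] = houses.get(house, 0) + 1
--     return houses
-- ===== Notes on version B (the rewrite author's own statement) =====
-- stated objective: alternative
-- what changed: A fuses walking and counting into one loop over a mutable (x, y, dict) state; B first materialises the whole visited-coordinate list by a running-sum scan seeded at the origin, then tallies frequencies over that list in a second, separate pass.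
import Mathlib
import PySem

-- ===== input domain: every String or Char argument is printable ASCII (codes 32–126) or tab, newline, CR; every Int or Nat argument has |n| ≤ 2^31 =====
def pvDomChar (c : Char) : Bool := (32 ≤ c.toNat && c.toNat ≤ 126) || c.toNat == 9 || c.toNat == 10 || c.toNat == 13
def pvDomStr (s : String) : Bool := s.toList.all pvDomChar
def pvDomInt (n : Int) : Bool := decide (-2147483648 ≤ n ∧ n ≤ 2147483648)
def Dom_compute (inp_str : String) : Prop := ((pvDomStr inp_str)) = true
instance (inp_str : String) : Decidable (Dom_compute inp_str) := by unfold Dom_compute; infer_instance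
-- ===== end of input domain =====

-- B replaces A's single fused walk-and-count loop by two separate passes:
-- a scan building the full visited-coordinate list, then a frequency tally over it.

-- ===== PORT A =====
-- path.get(direction): the direction dict of A (none = key absent, Python then raises TypeError on unpacking)
def pathGetA (c : Char) : Option (Int × Int) :=
  if c = '^' then some (0, 1)
  else if c = 'v' then some (0, -1)
  else if c = '>' then some (1, 0)
  else if c = '<' then some (-1, 0)
  else none

-- one iteration of A's loop over state (x, y, houses); the `none` branch is
-- where Python raises TypeError — excluded by Pre_compute, state kept unchanged
def computeStep (st : Int × Int × PySem.Dict (Int × Int) Int) (direction : Char) :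
    Int × Int × PySem.Dict (Int × Int) Int :=
  match pathGetA direction with
  | none => st
  | some (a, b) =>
    let x := st.1 + a
    let y := st.2.1 + b
    let house := (x, y)
    match st.2.2.get? house with
    | none => (x, y, st.2.2.insert house 1)
    | some n => (x, y, st.2.2.insert house (n + 1))

def compute (inp_str : String) : List (Int × Int × Int) :=
  let route := inp_str.toList
  let houses0 : PySem.Dict (Int × Int) Int := PySem.Dict.ofList [((0, 0), 1)]
  let fin := route.foldl computeStep (0, 0, houses0)
  fin.2.2.items.map (fun kv => (kv.1.1, kv.1.2, kv.2))

-- ===== PORT B =====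
-- B's deltas dict lookup
def pathGetB (c : Char) : Option (Int × Int) :=
  if c = '^' then some (0, 1)
  else if c = 'v' then some (0, -1)
  else if c = '>' then some (1, 0)
  else if c = '<' then some (-1, 0)
  else none

-- one iteration of B's first pass: append coords[-1] + delta; the `none`
-- branches are where Python raises (bad char / empty list) — never reached under Pre_
def altStep (coords : List (Int × Int)) (c : Char) : List (Int × Int) :=
  match pathGetB c with
  | none => coords
  | some d =>
    match PySem.List.pyGet? coords (-1) with
    | none => coords
    | some p => coords ++ [(p.1 + d.1, p.2 + d.2)]

def compute_alt (inp_str : String) : List (Int × Int × Int) :=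
  let coords := inp_str.toList.foldl altStep [(0, 0)]
  let houses := coords.foldl
    (fun (d : PySem.Dict (Int × Int) Int) h => d.insert h (d.getD h 0 + 1)) PySem.Dict.empty
  houses.items.map (fun kv => (kv.1.1, kv.1.2, kv.2))

-- ===== PRECONDITION & SPEC =====
-- Pre_ excludes exactly the inputs containing a non-direction character, on which
-- A raises TypeError (path.get returns None and unpacking fails).
def Pre_compute (inp_str : String) : Prop :=
  inp_str.toList.all (fun c => c = '^' ∨ c = 'v' ∨ c = '>' ∨ c = '<')

instance (inp_str : String) : Decidable (Pre_compute inp_str) := by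
  unfold Pre_compute; infer_instance

def pvWitness_compute : String := "^>v<<"

def Spec_compute (inp_str : String) (out : List (Int × Int × Int)) : Prop := out = compute_alt inp_str
instance (inp_str : String) (out : List (Int × Int × Int)) : Decidable (Spec_compute inp_str out) := by unfold Spec_compute; infer_instance

-- ===== CLAIM (what is proved, stated in full; the proofs are below) =====
def Claim_equal_compute : Prop := ∀ (inp_str : String), Dom_compute inp_str → Pre_compute inp_str → Spec_compute inp_str (compute inp_str)

-- ===== LEMMAS AND PROOFS =====

-- B's second pass, as a function of the coordinate list
def tallyD (l : List (Int × Int)) : PySem.Dict (Int × Int) Int :=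
  l.foldl (fun d h => d.insert h (d.getD h 0 + 1)) PySem.Dict.empty

theorem pathGetB_eq (c : Char) : pathGetB c = pathGetA c := rfl

theorem tally_append (l : List (Int × Int)) (h : Int × Int) :
    tallyD (l ++ [h]) = (tallyD l).insert h ((tallyD l).getD h 0 + 1) := by
  simp [tallyD]

-- A's conditional update equals B's unconditional getD-based update
theorem bump_eq (d : PySem.Dict (Int × Int) Int) (x y : Int) (h : Int × Int) :
    (match d.get? h with
     | none => (x, y, d.insert h 1)
     | some n => (x, y, d.insert h (n + 1))) = (x, y, d.insert h (d.getD h 0 + 1)) := by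
  cases hd : d.get? h with
  | none => simp [PySem.Dict.getD_eq_get?_getD, hd]
  | some n => simp [PySem.Dict.getD_eq_get?_getD, hd]

-- loop invariant: A's fused fold over (x, y, counterdict) tracks B's scan:
-- the position is the last coordinate and the dict is the tally of the list
theorem invariant (cs : List Char) : ∀ (L : List (Int × Int)) (x y : Int),
    L.getLast? = some (x, y) →
    ∃ x' y', (List.foldl altStep L cs).getLast? = some (x', y') ∧
      List.foldl computeStep (x, y, tallyD L) cs =
        (x', y', tallyD (List.foldl altStep L cs)) := by
  induction cs with
  | nil => intro L x y h; exact ⟨x, y, h, rfl⟩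
  | cons c cs ih =>
    intro L x y h
    cases hp : pathGetA c with
    | none =>
      simp only [List.foldl_cons, computeStep, altStep, pathGetB_eq, hp]
      exact ih L x y h
    | some d =>
      have hpy : PySem.List.pyGet? L (-1) = some (x, y) := by
        rw [PySem.List.pyGet?_neg_one]; exact h
      simp only [List.foldl_cons, computeStep, altStep, pathGetB_eq, hp, hpy]
      rw [bump_eq, ← tally_append]
      exact ih (L ++ [(x + d.1, y + d.2)]) (x + d.1) (y + d.2) (by simp)

theorem init_dict : (PySem.Dict.ofList [(((0 : Int), (0 : Int)), (1 : Int))]) = tallyD [(0, 0)] := by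
  decide

-- ===== VERDICT (by name: the statement is the Claim_ definition above) =====
theorem compute_spec : Claim_equal_compute := by
  intro s _ _
  unfold Spec_compute compute compute_alt
  obtain ⟨x', y', -, heq⟩ := invariant s.toList [(0, 0)] 0 0 rfl
  simp only []
  rw [init_dict, heq]
  simp [tallyD]
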